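-- pv_equiv track=rewrite | github.com/IsolatedRain/code_wars | completed/Double Cola.py | who_is_next
-- ===== SOURCE A (Python) =====
-- def who_is_next(names, r):
--     n = len(names)
--     if n >= r: return names[r - 1]
--     x = 0
--     count = 0
--     while x < r:
--         x += n
--         n *= 2
--         count += 1
--     return names[((n // 2) - 1 - (x - r)) // 2 ** (count - 1)]
--
-- names = ["Sheldon", "Leonard", "Penny", "Rajesh", "Howard"]
-- ===== SOURCE B (Python) =====
-- def who_is_next(names, r):
--     n = len(names)
--     if r <= n:
--         return names[r - 1]
--     k = ((r - 1) // n + 1).bit_length() - 1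
--     return names[(r - 1 - n * ((1 << k) - 1)) >> k]
-- ===== Notes on version B (the rewrite author's own statement) =====
-- stated objective: alternative
-- what changed: Replaces A's doubling while-loop (accumulator x, doubled n, iteration counter count, backward offset formula) by a loop-free closed form: the round number is computed directly as k = ((r-1)//n + 1).bit_length() - 1 and the answer is names[(r-1 - n*(2^k - 1)) >> k].
import Mathlib
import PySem

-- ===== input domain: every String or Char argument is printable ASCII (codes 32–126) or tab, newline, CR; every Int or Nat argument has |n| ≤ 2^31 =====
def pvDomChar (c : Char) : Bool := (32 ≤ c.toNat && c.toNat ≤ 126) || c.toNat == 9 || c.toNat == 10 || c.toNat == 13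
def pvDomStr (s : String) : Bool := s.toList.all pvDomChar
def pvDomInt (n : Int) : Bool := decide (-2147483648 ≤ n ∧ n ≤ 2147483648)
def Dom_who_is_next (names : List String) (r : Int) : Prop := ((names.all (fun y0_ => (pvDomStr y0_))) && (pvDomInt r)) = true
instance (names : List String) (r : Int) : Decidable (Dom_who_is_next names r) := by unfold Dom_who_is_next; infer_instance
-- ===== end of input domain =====

-- B replaces A's doubling while-loop by a loop-free closed form: the round number comes
-- straight from bit_length, and the index from one arithmetic expression (objective: alternative).

-- ===== PORT A =====
-- A's while loop: x += n; n *= 2; count += 1 while x < r. The '0 < n' conjunct is a totality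
-- guard only: with n ≤ 0 and x < r Python's loop never terminates (excluded by Pre_).
def whoLoopA (r x n count : Int) : Int × Int × Int :=
  if _h : x < r ∧ 0 < n then whoLoopA r (x + n) (n * 2) (count + 1)
  else (x, n, count)
termination_by (r - x).toNat
decreasing_by omega

def who_is_next (names : List String) (r : Int) : String :=
  let n : Int := names.length
  if n ≥ r then (PySem.List.pyGet? names (r - 1)).getD ""   -- none = IndexError, excluded by Pre_
  else
    let s := whoLoopA r 0 n 0
    -- names[((n // 2) - 1 - (x - r)) // 2 ** (count - 1)]; count ≥ 1 whenever Python reaches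
    -- this line and terminates, so 2 ** (count - 1) is (count - 1).toNat here
    (PySem.List.pyGet? names
      (PySem.Int.floordiv (PySem.Int.floordiv s.2.1 2 - 1 - (s.1 - r))
        (2 ^ (s.2.2 - 1).toNat))).getD ""

-- ===== PORT B =====
-- len(names) = 0 in the else-branch would be Python's ZeroDivisionError (excluded by Pre_);
-- ((r-1)//n + 1).bit_length() is PySem.Int.bitLength; '1 << k' is 2 ^ k and 'x >> k' is
-- floor division by 2 ^ k, exact for every int.
def who_is_next_alt (names : List String) (r : Int) : String :=
  let n : Int := names.length
  if r ≤ n then (PySem.List.pyGet? names (r - 1)).getD ""   -- none = IndexError, excluded by Pre_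
  else
    let k : Nat := PySem.Int.bitLength (PySem.Int.floordiv (r - 1) n + 1) - 1
    (PySem.List.pyGet? names
      (PySem.Int.floordiv (r - 1 - n * (2 ^ k - 1)) (2 ^ k))).getD ""

-- ===== PRECONDITION & SPEC =====
-- Pre_ excludes exactly the inputs where the Pythons do not return: names = [] (A diverges for
-- r > 0, raises IndexError otherwise; B raises ZeroDivisionError or IndexError) and
-- r < 1 - len(names) (both raise IndexError on names[r-1]).
def Pre_who_is_next (names : List String) (r : Int) : Prop :=
  names ≠ [] ∧ 1 - (names.length : Int) ≤ r
instance (names : List String) (r : Int) : Decidable (Pre_who_is_next names r) := by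
  unfold Pre_who_is_next; infer_instance

def pvWitness_who_is_next : List String × Int := (["Sheldon", "Leonard", "Penny"], 8)

def Spec_who_is_next (names : List String) (r : Int) (out : String) : Prop := out = who_is_next_alt names r
instance (names : List String) (r : Int) (out : String) : Decidable (Spec_who_is_next names r out) := by unfold Spec_who_is_next; infer_instance

-- ===== CLAIM (what is proved, stated in full; the proofs are below) =====
def Claim_equal_who_is_next : Prop := ∀ (names : List String) (r : Int), Dom_who_is_next names r → Pre_who_is_next names r → Spec_who_is_next names r (who_is_next names r)

-- ===== LEMMAS AND PROOFS =====

-- Characterisation of A's loop: starting below r with positive n it performs some j ≥ 1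
-- doublings and stops at the first accumulated total ≥ r.
theorem whoLoopA_char (r x n c : Int) (hn : 0 < n) (hx : x < r) :
    ∃ j : Nat, 1 ≤ j ∧
      whoLoopA r x n c = (x + n * (2 ^ j - 1), n * 2 ^ j, c + (j : Int)) ∧
      x + n * (2 ^ (j - 1) - 1) < r ∧ r ≤ x + n * (2 ^ j - 1) := by
  have hstep : whoLoopA r x n c = whoLoopA r (x + n) (n * 2) (c + 1) := by
    rw [whoLoopA]; split_ifs with h
    · rfl
    · exact absurd ⟨hx, hn⟩ h
  by_cases hrec : x + n < r
  · obtain ⟨j, hj1, heq, hlo, hhi⟩ := whoLoopA_char r (x + n) (n * 2) (c + 1) (by omega) hrec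
    refine ⟨j + 1, by omega, ?_, ?_, ?_⟩
    · rw [hstep, heq]
      simp only [Prod.mk.injEq]
      refine ⟨by ring, by ring, by push_cast; ring⟩
    · have h2 : (2 : Int) ^ (j + 1 - 1) = 2 ^ (j - 1) * 2 := by
        have : j - 1 + 1 = j := by omega
        calc (2 : Int) ^ (j + 1 - 1) = 2 ^ j := by norm_num
          _ = 2 ^ (j - 1 + 1) := by rw [this]
          _ = 2 ^ (j - 1) * 2 := by ring
      have hlo' : x + n + n * 2 * (2 ^ (j - 1) - 1) < r := hlo
      calc x + n * (2 ^ (j + 1 - 1) - 1) = x + n + n * 2 * (2 ^ (j - 1) - 1) := by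
            rw [h2]; ring
        _ < r := hlo'
    · calc r ≤ x + n + n * 2 * (2 ^ j - 1) := hhi
        _ = x + n * (2 ^ (j + 1) - 1) := by ring
  · refine ⟨1, le_refl 1, ?_, by simpa using hx, by push_cast; omega⟩
    rw [hstep, whoLoopA]
    split_ifs with h
    · exact absurd h.1 (by omega)
    · simp only [Prod.mk.injEq]; refine ⟨by ring, by ring, by ring⟩
termination_by (r - x).toNat
decreasing_by omega

-- bitLength from a two-sided power bracket.
theorem bitLength_eq_of_bracket (t : Int) (j : Nat) (hj : 1 ≤ j)
    (hlo : 2 ^ (j - 1) ≤ t) (hhi : t < 2 ^ j) :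
    PySem.Int.bitLength t = j := by
  have ht : 0 < t := lt_of_lt_of_le (by positivity) hlo
  have habs : t.natAbs = t.toNat := by omega
  have hlo' : 2 ^ (j - 1) ≤ t.natAbs := by
    have : ((2 : Int) ^ (j - 1)) = ((2 ^ (j - 1) : Nat) : Int) := by push_cast; ring
    omega
  have hhi' : t.natAbs < 2 ^ j := by
    have : ((2 : Int) ^ j) = ((2 ^ j : Nat) : Int) := by push_cast; ring
    omega
  have h1 := PySem.Int.lt_two_pow_bitLength t
  have h2 := PySem.Int.two_pow_bitLength_le t (by omega)
  -- 2^(bl-1) ≤ |t| < 2^j gives bl ≤ j; 2^(j-1) ≤ |t| < 2^bl gives j ≤ bl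
  have hble : PySem.Int.bitLength t - 1 < j := by
    by_contra hc
    have := Nat.pow_le_pow_right (by norm_num : 1 ≤ 2) (by omega : j ≤ PySem.Int.bitLength t - 1)
    omega
  have hjle : j - 1 < PySem.Int.bitLength t := by
    by_contra hc
    have := Nat.pow_le_pow_right (by norm_num : 1 ≤ 2) (by omega : PySem.Int.bitLength t ≤ j - 1)
    omega
  omega

-- ===== VERDICT (by name: the statement is the Claim_ definition above) =====
theorem who_is_next_spec : Claim_equal_who_is_next := by
  intro names r _hdom hpre
  obtain ⟨hne, hr⟩ := hpre
  have hm : 0 < (names.length : Int) := by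
    have : names.length ≠ 0 := fun h => hne (List.eq_nil_of_length_eq_zero h)
    omega
  show who_is_next names r = who_is_next_alt names r
  unfold who_is_next who_is_next_alt
  dsimp only
  by_cases hcase : (names.length : Int) ≥ r
  · rw [if_pos hcase, if_pos hcase]
  · rw [if_neg hcase, if_neg (by omega : ¬ r ≤ (names.length : Int))]
    set n := (names.length : Int) with hn
    obtain ⟨j, hj1, heq, hlo, hhi⟩ := whoLoopA_char r 0 n 0 hm (by omega)
    rw [heq]
    dsimp only
    simp only [zero_add] at hlo hhi
    -- A's exponent: count = j, so (count - 1).toNat = j - 1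
    have hcnt : ((0 : Int) + (j : Int) - 1).toNat = j - 1 := by omega
    rw [hcnt]
    -- A's n // 2 = n * 2^(j-1)
    have hpow : (n * 2 ^ j) = (n * 2 ^ (j - 1)) * 2 := by
      have : j - 1 + 1 = j := by omega
      calc n * 2 ^ j = n * 2 ^ (j - 1 + 1) := by rw [this]
        _ = (n * 2 ^ (j - 1)) * 2 := by ring
    have hhalf : PySem.Int.floordiv (n * 2 ^ j) 2 = n * 2 ^ (j - 1) := by
      rw [PySem.Int.floordiv_eq_iff_of_pos (by norm_num)]
      constructor <;> nlinarith [hpow]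
    rw [hhalf]
    -- A's numerator is B's numerator
    have hnum : n * 2 ^ (j - 1) - 1 - (0 + n * (2 ^ j - 1) - r)
        = r - 1 - n * (2 ^ (j - 1) - 1) := by
      have h2 : (n * 2 ^ (j - 1)) * 2 = n * 2 ^ j := hpow.symm
      nlinarith [h2]
    rw [hnum]
    -- B's round number k = j - 1
    have hq := PySem.Int.floordiv_eq_iff_of_pos hm (a := r - 1)
      (q := PySem.Int.floordiv (r - 1) n) |>.mp rfl
    have hbl : PySem.Int.bitLength (PySem.Int.floordiv (r - 1) n + 1) = j := by
      apply bitLength_eq_of_bracket _ _ hj1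
      · -- 2^(j-1) ≤ q + 1  from  n*(2^(j-1)-1) < r
        by_contra hc
        push Not at hc
        have hq2 : (PySem.Int.floordiv (r - 1) n + 1) * n ≤ (2 ^ (j - 1) - 1 + 1) * n := by
          have h1 : PySem.Int.floordiv (r - 1) n + 1 ≤ 2 ^ (j - 1) - 1 + 1 := by omega
          exact mul_le_mul_of_nonneg_right (by omega) (by omega)
        nlinarith [hq.2]
      · -- q + 1 < 2^j  from  r ≤ n*(2^j - 1)
        by_contra hc
        push Not at hc
        have : (2 ^ j - 1) * n ≤ PySem.Int.floordiv (r - 1) n * n :=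
          mul_le_mul_of_nonneg_right (by omega) (by omega)
        nlinarith [hq.1]
    rw [hbl]
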